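-- pv_equiv track=rewrite | github.com/LeeGukgeon/LeeGukgeon | codingtest/20671.py | larger
-- ===== SOURCE A (Python) =====
-- def larger(a,b):
--     sa=str(a)
--     sb=str(b)
--     swap=False
--     if len(sb)<len(sa):
--         sa,sb=sb,sa
--         swap=True
--     la=len(sa)
--     lb=len(sb)
--     for i in range((lb//la)):
--         for j in range(1,1+la):
--             if sb=='':
--                 return False^swap
--             if int(sa[:j])<int(sb[:j]):
--                 return True^swap
--             if int(sa[:j])>int(sb[:j]):
--                 return False^swap
--         sb=sb[la:]
--     if sb=='':
--         return False^swap
--     return larger(sa,sb)^swap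
-- ===== SOURCE B (Python) =====
-- def larger(a, b):
--     # Iterative: one running swap parity p instead of A's per-level recursion; each
--     # level materialises the prefix-comparison pairs as one flat list and searches
--     # it for the first unequal pair, instead of A's nested early-return loops.
--     sa, sb, p = str(a), str(b), False
--     while True:
--         if len(sb) < len(sa):
--             sa, sb, p = sb, sa, not p
--         la, lb = len(sa), len(sb)
--         pairs = [(int(sa[:j]), int(sb[i * la:i * la + j]))
--                  for i in range(lb // la) for j in range(1, la + 1)]
--         d = next((xy for xy in pairs if xy[0] != xy[1]), None)
--         if d is not None:
--             return (d[0] < d[1]) != p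
--         sb = sb[la * (lb // la):]
--         if not sb:
--             return p
-- ===== Notes on version B (the rewrite author's own statement) =====
-- stated objective: alternative
-- what changed: A's per-level tail recursion with nested early-return loops (outer block loop, inner prefix loop) is replaced by one iterative loop carrying a running swap parity that, per level, builds the flat list of prefix-comparison int pairs with a comprehension and decides at the first unequal pair found by next().
import Mathlib
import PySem

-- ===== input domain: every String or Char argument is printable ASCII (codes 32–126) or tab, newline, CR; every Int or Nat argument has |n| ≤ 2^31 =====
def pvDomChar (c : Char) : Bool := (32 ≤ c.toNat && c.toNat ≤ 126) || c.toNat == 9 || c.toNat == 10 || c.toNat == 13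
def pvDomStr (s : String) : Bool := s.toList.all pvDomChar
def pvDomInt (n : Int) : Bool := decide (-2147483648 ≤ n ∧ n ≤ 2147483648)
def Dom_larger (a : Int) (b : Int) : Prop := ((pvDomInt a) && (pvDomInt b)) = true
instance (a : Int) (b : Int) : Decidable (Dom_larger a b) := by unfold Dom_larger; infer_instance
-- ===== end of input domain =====

-- B replaces A's per-level tail recursion with nested early-return loops by one iterative
-- loop with a running swap parity that, per level, builds the flat list of prefix-comparison
-- int pairs and decides at its first unequal pair; return-value equivalence is proved on Pre_.

-- ===== PORT A =====
-- int(s) is PySem.Int.ofChars?; `.getD 0` only discharges the Option — on inputs admitted by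
-- Pre_ every parsed prefix is a digit string, so ofChars? is `some` and the default is unused.
-- sa[:j] (0 ≤ j) is List.take j; sb[la:] (0 ≤ la) is List.drop la — exact for these bounds.

-- for j in range(1, 1+la): fuel counts the remaining iterations, j the Python index
def innerA (sa sb : List Char) : Nat → Nat → Option Bool
  | _, 0 => none
  | j, fuel+1 =>
    if sb = [] then some false
    else if (PySem.Int.ofChars? (sa.take j)).getD 0 < (PySem.Int.ofChars? (sb.take j)).getD 0 then
      some true
    else if (PySem.Int.ofChars? (sb.take j)).getD 0 < (PySem.Int.ofChars? (sa.take j)).getD 0 then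
      some false
    else innerA sa sb (j+1) fuel

-- for i in range(lb//la): early return bubbles out as `some r`; otherwise the final sb is returned
def outerA (sa : List Char) : List Char → Nat → Option Bool × List Char
  | sb, 0 => (none, sb)
  | sb, n+1 =>
    match innerA sa sb 1 sa.length with
    | some r => (some r, sb)
    | none => outerA sa (sb.drop sa.length) n

-- the recursive body; str() on the already-string arguments of the recursive call is the
-- identity, so the recursion stays on List Char.  The fuel only makes the recursion
-- structural: it never runs out on inputs reached from the wrapper (min length shrinks).
def largerRec : Nat → List Char → List Char → Bool
  | 0, _, _ => false
  | fuel+1, a, b =>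
    let sa := if b.length < a.length then b else a
    let sb := if b.length < a.length then a else b
    let swap := decide (b.length < a.length)
    -- lb // la: Nat division on lengths = Python's // (both operands nonnegative)
    match outerA sa sb (sb.length / sa.length) with
    | (some r, _) => xor r swap
    | (none, sb') => if sb' = [] then xor false swap else xor (largerRec fuel sa sb') swap

def larger (a : Int) (b : Int) : Bool :=
  let sa := PySem.Int.toChars a
  let sb := PySem.Int.toChars b
  largerRec (sa.length + sb.length + 1) sa sb

-- ===== PORT B =====
-- the pairs contributed by the block starting where t does:
-- [(int(sa[:j]), int(t[:j])) for j in range(1, la+1)], iterated as j = k+1, k ∈ range(la)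
def blockPairs (sa t : List Char) : List (Int × Int) :=
  (List.range sa.length).map (fun k =>
    ((PySem.Int.ofChars? (sa.take (k+1))).getD 0,
     (PySem.Int.ofChars? (t.take (k+1))).getD 0))

-- pairs = [...] comprehension; sb[i*la : i*la+j] = (sb.drop (i*la)).take j — exact, the slice
-- bounds are nonnegative; range(lb//la) is List.range over the Nat quotient (both args ≥ 0)
def pairsB (sa sb : List Char) : List (Int × Int) :=
  (List.range (sb.length / sa.length)).flatMap (fun i => blockPairs sa (sb.drop (i * sa.length)))

-- while True: one fuel step per iteration; p is the running swap parity;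
-- next((xy for xy in pairs if xy[0] != xy[1]), None) is List.find?
def levelB : Nat → List Char → List Char → Bool → Bool
  | 0, _, _, p => p
  | f+1, sa, sb, p =>
    let sa' := if sb.length < sa.length then sb else sa
    let sb' := if sb.length < sa.length then sa else sb
    let p' := if sb.length < sa.length then !p else p
    match (pairsB sa' sb').find? (fun xy => decide (xy.1 ≠ xy.2)) with
    | some xy => xor (decide (xy.1 < xy.2)) p'
    | none =>
      let rest := sb'.drop (sa'.length * (sb'.length / sa'.length))
      if rest = [] then p' else levelB f sa' rest p'

def larger_alt (a : Int) (b : Int) : Bool :=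
  let sa := PySem.Int.toChars a
  let sb := PySem.Int.toChars b
  levelB (sa.length + sb.length + 1) sa sb false

-- ===== PRECONDITION & SPEC =====
-- Pre_ excludes exactly the inputs where Python A raises: for a < 0 or b < 0 the one-character
-- prefix '-' makes int() raise ValueError.
def Pre_larger (a : Int) (b : Int) : Prop := 0 ≤ a ∧ 0 ≤ b
instance (a : Int) (b : Int) : Decidable (Pre_larger a b) := by unfold Pre_larger; infer_instance

def pvWitness_larger : Int × Int := (12, 1213)

def Spec_larger (a : Int) (b : Int) (out : Bool) : Prop := out = larger_alt a b
instance (a : Int) (b : Int) (out : Bool) : Decidable (Spec_larger a b out) := by unfold Spec_larger; infer_instance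

-- ===== CLAIM (what is proved, stated in full; the proofs are below) =====
def Claim_equal_larger : Prop := ∀ (a : Int) (b : Int), Dom_larger a b → Pre_larger a b → Spec_larger a b (larger a b)

-- ===== LEMMAS AND PROOFS =====

lemma inner_find (sa sb : List Char) (hsb : sb ≠ []) :
    ∀ (fuel j : Nat),
      innerA sa sb j fuel =
        Option.map (fun xy : Int × Int => decide (xy.1 < xy.2))
          (((List.range fuel).map (fun k =>
              ((PySem.Int.ofChars? (sa.take (j+k))).getD 0,
               (PySem.Int.ofChars? (sb.take (j+k))).getD 0))).find?
            (fun xy => decide (xy.1 ≠ xy.2))) := by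
  intro fuel
  induction fuel with
  | zero => intro j; simp [innerA]
  | succ f ih =>
    intro j
    rw [List.range_succ_eq_map]
    simp only [List.map_cons, List.map_map]
    have hshift : (List.map ((fun k =>
        ((PySem.Int.ofChars? (sa.take (j+k))).getD 0,
         (PySem.Int.ofChars? (sb.take (j+k))).getD 0)) ∘ Nat.succ) (List.range f))
      = List.map (fun k =>
        ((PySem.Int.ofChars? (sa.take (j+1+k))).getD 0,
         (PySem.Int.ofChars? (sb.take (j+1+k))).getD 0)) (List.range f) := by
      apply List.map_congr_left
      intro k _
      have h : j + Nat.succ k = j + 1 + k := by omega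
      simp [Function.comp_apply, h]
    rw [hshift]
    simp only [innerA, if_neg hsb, Nat.add_zero]
    rcases lt_trichotomy ((PySem.Int.ofChars? (sa.take j)).getD 0)
        ((PySem.Int.ofChars? (sb.take j)).getD 0) with h | h | h
    · rw [if_pos h, List.find?_cons_of_pos (by simp [ne_of_lt h])]
      simp [h]
    · rw [if_neg (by simp [h]), if_neg (by simp [h]),
        List.find?_cons_of_neg (by simp [h])]
      exact ih (j+1)
    · rw [if_neg (not_lt.mpr (le_of_lt h)), if_pos h,
        List.find?_cons_of_pos (by simp [(ne_of_lt h).symm])]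
      simp [not_lt.mpr (le_of_lt h)]

lemma inner_block (sa sb : List Char) (hsb : sb ≠ []) :
    innerA sa sb 1 sa.length =
      Option.map (fun xy : Int × Int => decide (xy.1 < xy.2))
        ((blockPairs sa sb).find? (fun xy => decide (xy.1 ≠ xy.2))) := by
  rw [inner_find sa sb hsb sa.length 1]
  unfold blockPairs
  congr 2
  apply List.map_congr_left
  intro k _
  simp [Nat.add_comm 1 k]

lemma outer_find (sa : List Char) (hsa : sa ≠ []) :
    ∀ (n : Nat) (sb : List Char), sa.length * n ≤ sb.length →
      (outerA sa sb n).1 =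
        Option.map (fun xy : Int × Int => decide (xy.1 < xy.2))
          (((List.range n).flatMap (fun i => blockPairs sa (sb.drop (i * sa.length)))).find?
            (fun xy => decide (xy.1 ≠ xy.2))) ∧
      ((outerA sa sb n).1 = none → (outerA sa sb n).2 = sb.drop (sa.length * n)) := by
  have hpos : 0 < sa.length := List.length_pos_iff.mpr hsa
  intro n
  induction n with
  | zero => intro sb _; simp [outerA]
  | succ m ih =>
    intro sb hlen
    rw [Nat.mul_succ] at hlen
    have hsbne : sb ≠ [] := by
      intro e
      rw [e, List.length_nil] at hlen
      have h0 : sa.length ≤ 0 := le_trans (Nat.le_add_left _ _) hlen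
      omega
    rw [List.range_succ_eq_map, List.flatMap_cons, List.flatMap_map]
    have hreindex : (fun i => blockPairs sa (sb.drop (Nat.succ i * sa.length)))
        = fun i => blockPairs sa ((sb.drop sa.length).drop (i * sa.length)) := by
      funext i
      rw [List.drop_drop]
      congr 2
      rw [Nat.succ_mul]
      ring
    rw [hreindex, List.find?_append]
    simp only [outerA, Nat.zero_mul, List.drop_zero]
    rw [inner_block sa sb hsbne]
    cases hfb : (blockPairs sa sb).find? (fun xy => decide (xy.1 ≠ xy.2)) with
    | some xy => simp
    | none =>
      simp only [Option.map_none, Option.none_or]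
      have hlen' : sa.length * m ≤ (sb.drop sa.length).length := by
        rw [List.length_drop]; omega
      obtain ⟨h1, h2⟩ := ih (sb.drop sa.length) hlen'
      refine ⟨h1, fun hz => ?_⟩
      rw [h2 hz, List.drop_drop]
      congr 1
      ring

lemma level_rec (fuel : Nat) :
    ∀ (sa sb : List Char) (p : Bool), sa ≠ [] → sb ≠ [] →
      levelB fuel sa sb p = xor (largerRec fuel sa sb) p := by
  induction fuel with
  | zero => intro sa sb p _ _; simp [levelB, largerRec]
  | succ f ih =>
    intro sa sb p hsa hsb
    simp only [levelB, largerRec]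
    set sa' := if sb.length < sa.length then sb else sa with hsa'
    set sb' := if sb.length < sa.length then sa else sb with hsb'
    have hxor : ∀ r : Bool,
        xor r (if sb.length < sa.length then !p else p)
          = xor (xor r (decide (sb.length < sa.length))) p := by
      intro r
      by_cases hc : sb.length < sa.length <;> cases r <;> cases p <;> simp [hc]
    have hsa'ne : sa' ≠ [] := by rw [hsa']; split <;> assumption
    obtain ⟨h1, h2⟩ :=
      outer_find sa' hsa'ne (sb'.length / sa'.length) sb' (Nat.mul_div_le _ _)
    have h1' : (outerA sa' sb' (sb'.length / sa'.length)).1 =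
        Option.map (fun xy : Int × Int => decide (xy.1 < xy.2))
          ((pairsB sa' sb').find? (fun xy => decide (xy.1 ≠ xy.2))) := h1
    cases hoa : outerA sa' sb' (sb'.length / sa'.length) with
    | mk o rest2 =>
      rw [hoa] at h1' h2
      simp only at h1' h2
      cases hf : (pairsB sa' sb').find? (fun xy => decide (xy.1 ≠ xy.2)) with
      | some xy =>
        rw [hf] at h1'
        simp only [Option.map_some] at h1'
        rw [h1']
        exact hxor _
      | none =>
        rw [hf] at h1'
        simp only [Option.map_none] at h1'
        subst h1'
        have hrest : rest2 = sb'.drop (sa'.length * (sb'.length / sa'.length)) := h2 rfl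
        rw [← hrest]
        by_cases hr : rest2 = []
        · show (if rest2 = [] then (if sb.length < sa.length then !p else p)
              else levelB f sa' rest2 (if sb.length < sa.length then !p else p))
            = xor (if rest2 = [] then xor false (decide (sb.length < sa.length))
              else xor (largerRec f sa' rest2) (decide (sb.length < sa.length))) p
          rw [if_pos hr, if_pos hr]
          simpa using hxor false
        · show (if rest2 = [] then (if sb.length < sa.length then !p else p)
              else levelB f sa' rest2 (if sb.length < sa.length then !p else p))
            = xor (if rest2 = [] then xor false (decide (sb.length < sa.length))
              else xor (largerRec f sa' rest2) (decide (sb.length < sa.length))) p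
          rw [if_neg hr, if_neg hr, ih sa' rest2 _ hsa'ne hr]
          exact hxor (largerRec f sa' rest2)

lemma toChars_ne_nil (n : Int) : PySem.Int.toChars n ≠ [] := by
  unfold PySem.Int.toChars
  split
  · simp
  · exact List.ne_nil_of_length_pos Nat.length_toDigits_pos

-- ===== VERDICT (by name: the statement is the Claim_ definition above) =====
theorem larger_spec : Claim_equal_larger := by
  intro a b _ _
  unfold Spec_larger larger larger_alt
  exact ((level_rec _ _ _ false (toChars_ne_nil a) (toChars_ne_nil b)).trans (Bool.xor_false _)).symm
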